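-- pv_equiv track=rewrite | github.com/uday4a9/int_pract | 014.count_right_side_zeros.py | count_right_side_zeros
-- ===== SOURCE A (Python) =====
-- def count_right_side_zeros(nums, siz):
--     if siz == 0 or nums[siz-1] != 0:
--         return 0
--
--     low, high = 0, siz-1
--
--     while low < high:
--         mid = (low + high) // 2
--
--         if nums[mid] == 0:
--             high = mid
--         else:
--             low = mid + 1
--
--     return siz - low
-- ===== SOURCE B (Python) =====
-- def count_right_side_zeros(nums, siz):
--     def count_from(lo, n):
--         # probes the same midpoints as A's while loop, but returns the count directly
--         if n <= 0:
--             return siz - lo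
--         h = n // 2
--         if nums[lo + h] == 0:
--             return count_from(lo, h)
--         return count_from(lo + h + 1, n - h - 1)
--
--     if siz == 0 or nums[siz - 1] != 0:
--         return 0
--     return count_from(0, siz - 1)
-- ===== Notes on version B (the rewrite author's own statement) =====
-- stated objective: alternative
-- what changed: The iterative (low, high) while-loop binary search followed by a final subtraction is replaced by a divide-and-conquer recursion over an (offset, length) interval that returns the count siz - lo directly at its base case.
import Mathlib
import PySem

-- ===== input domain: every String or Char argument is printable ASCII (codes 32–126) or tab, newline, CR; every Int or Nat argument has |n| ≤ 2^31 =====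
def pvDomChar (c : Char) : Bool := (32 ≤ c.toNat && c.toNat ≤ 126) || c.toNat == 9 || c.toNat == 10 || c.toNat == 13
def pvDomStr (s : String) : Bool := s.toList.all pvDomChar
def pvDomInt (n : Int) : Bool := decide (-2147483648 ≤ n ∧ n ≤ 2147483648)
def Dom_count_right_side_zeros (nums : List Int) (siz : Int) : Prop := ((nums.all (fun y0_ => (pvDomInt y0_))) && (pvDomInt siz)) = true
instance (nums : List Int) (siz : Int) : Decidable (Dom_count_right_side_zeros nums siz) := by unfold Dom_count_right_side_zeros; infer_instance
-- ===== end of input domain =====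

-- B replaces A's iterative (low, high) while loop plus final subtraction by an (offset, length) divide-and-conquer recursion returning the count directly; same probes, same result.

-- ===== PORT A =====
-- the while loop of A: state (low, high), terminates since the gap shrinks
def crszLoop (nums : List Int) (low high : Int) : Int :=
  if _h : low < high then
    let mid := PySem.Int.floordiv (low + high) 2
    if (PySem.List.pyGet? nums mid).getD 0 = 0 then
      crszLoop nums low mid
    else
      crszLoop nums (mid + 1) high
  else
    low
termination_by (high - low).toNat
decreasing_by
  · have := (PySem.Int.floordiv_two_mid_bounds (le_of_lt _h))
    have h2 : PySem.Int.floordiv (low + high) 2 < high := by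
      rw [PySem.Int.floordiv_lt_iff_lt_mul (by omega)]; omega
    omega
  · have := (PySem.Int.floordiv_two_mid_bounds (le_of_lt _h))
    omega

def count_right_side_zeros (nums : List Int) (siz : Int) : Int :=
  if siz = 0 then 0
  else
    match PySem.List.pyGet? nums (siz - 1) with
    | none => 0          -- IndexError; excluded by Pre_
    | some v =>
      if v ≠ 0 then 0
      else siz - crszLoop nums 0 (siz - 1)

-- ===== PORT B =====
-- B's helper count_from(lo, n): interval [lo, lo+n), returns siz - final_offset
def crszCount (nums : List Int) (siz lo n : Int) : Int :=
  if _h : n ≤ 0 then siz - lo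
  else
    let h := PySem.Int.floordiv n 2
    if (PySem.List.pyGet? nums (lo + h)).getD 0 = 0 then
      crszCount nums siz lo h
    else
      crszCount nums siz (lo + h + 1) (n - h - 1)
termination_by n.toNat
decreasing_by
  · have h2 : PySem.Int.floordiv n 2 < n := by
      rw [PySem.Int.floordiv_lt_iff_lt_mul (by omega)]; omega
    omega
  · have h1 : 0 ≤ PySem.Int.floordiv n 2 := by
      rw [PySem.Int.le_floordiv_iff_mul_le (by omega)]; omega
    omega

def count_right_side_zeros_alt (nums : List Int) (siz : Int) : Int :=
  if siz = 0 ∨ (PySem.List.pyGet? nums (siz - 1)).getD 1 ≠ 0 then 0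
  else crszCount nums siz 0 (siz - 1)

-- ===== PRECONDITION & SPEC =====
-- Pre_ excludes exactly the inputs where nums[siz-1] raises IndexError in Python.
def Pre_count_right_side_zeros (nums : List Int) (siz : Int) : Prop :=
  siz = 0 ∨ PySem.Raise.InRange nums.length (siz - 1)
instance (nums : List Int) (siz : Int) : Decidable (Pre_count_right_side_zeros nums siz) := by
  unfold Pre_count_right_side_zeros; infer_instance

def pvWitness_count_right_side_zeros : List Int × Int := ([1, 0, 0], 3)

def Spec_count_right_side_zeros (nums : List Int) (siz : Int) (out : Int) : Prop := out = count_right_side_zeros_alt nums siz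
instance (nums : List Int) (siz : Int) (out : Int) : Decidable (Spec_count_right_side_zeros nums siz out) := by unfold Spec_count_right_side_zeros; infer_instance

-- ===== CLAIM (what is proved, stated in full; the proofs are below) =====
def Claim_equal_count_right_side_zeros : Prop := ∀ (nums : List Int) (siz : Int), Dom_count_right_side_zeros nums siz → Pre_count_right_side_zeros nums siz → Spec_count_right_side_zeros nums siz (count_right_side_zeros nums siz)

-- ===== LEMMAS AND PROOFS =====

-- B's counting recursion on (low, high - low) equals siz minus A's loop on (low, high)
theorem crszCount_eq_loop (nums : List Int) (siz low high : Int) :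
    crszCount nums siz low (high - low) = siz - crszLoop nums low high := by
  by_cases hlt : low < high
  · have hk : ∃ k : Nat, (high - low).toNat = k := ⟨_, rfl⟩
    obtain ⟨k, hk⟩ := hk
    induction k using Nat.strong_induction_on generalizing low high with
    | _ k ih =>
      rw [crszLoop, crszCount]
      have hmid : PySem.Int.floordiv (low + high) 2 = low + PySem.Int.floordiv (high - low) 2 := by
        rw [PySem.Int.floordiv_eq_ediv_of_pos (by omega), PySem.Int.floordiv_eq_ediv_of_pos (by omega)]
        omega
      have h1 : 0 ≤ PySem.Int.floordiv (high - low) 2 := by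
        rw [PySem.Int.le_floordiv_iff_mul_le (by omega)]; omega
      have h2 : PySem.Int.floordiv (high - low) 2 < high - low := by
        rw [PySem.Int.floordiv_lt_iff_lt_mul (by omega)]; omega
      simp only [dif_pos hlt, dif_neg (by omega : ¬ high - low ≤ 0), hmid]
      split
      · -- zero at the midpoint: recurse on the left half
        by_cases hlt' : low < low + PySem.Int.floordiv (high - low) 2
        · have := ih ((low + PySem.Int.floordiv (high - low) 2) - low).toNat (by omega) _ _ hlt' rfl
          rw [← this]; ring_nf
        · rw [crszLoop, crszCount]
          simp only [dif_neg hlt', dif_pos (by omega : PySem.Int.floordiv (high - low) 2 ≤ 0)]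
      · -- nonzero at the midpoint: recurse on the right half
        by_cases hlt' : low + PySem.Int.floordiv (high - low) 2 + 1 < high
        · have := ih (high - (low + PySem.Int.floordiv (high - low) 2 + 1)).toNat (by omega) _ _ hlt' rfl
          rw [← this]; ring_nf
        · rw [crszLoop, crszCount]
          simp only [dif_neg hlt', dif_pos (by omega :
            high - low - PySem.Int.floordiv (high - low) 2 - 1 ≤ 0)]
  · rw [crszLoop, crszCount]
    simp only [dif_neg hlt, dif_pos (by omega : high - low ≤ 0)]

-- ===== VERDICT (by name: the statement is the Claim_ definition above) =====
theorem count_right_side_zeros_spec : Claim_equal_count_right_side_zeros := by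
  intro nums siz _ hpre
  unfold Spec_count_right_side_zeros count_right_side_zeros count_right_side_zeros_alt
  by_cases hz : siz = 0
  · simp [hz]
  · have hin : PySem.Raise.InRange nums.length (siz - 1) := by
      rcases hpre with h | h
      · exact absurd h hz
      · exact h
    obtain ⟨v, hv⟩ : ∃ v, PySem.List.pyGet? nums (siz - 1) = some v := by
      cases hget : PySem.List.pyGet? nums (siz - 1) with
      | none => exact absurd hin (by simpa [PySem.List.pyGet?_eq_none_iff] using hget)
      | some v => exact ⟨v, rfl⟩
    rw [if_neg hz, hv]
    by_cases hv0 : v = 0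
    · simp only [hv0, ne_eq, not_true_eq_false, if_false, Option.getD_some, or_false,
        if_neg hz]
      have := crszCount_eq_loop nums siz 0 (siz - 1)
      simpa using this.symm
    · simp [hv0, hz]
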